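-- pv_equiv track=rewrite | github.com/HEPonHPC/apprentice | apprentice/tools.py | indices
-- ===== SOURCE A (Python) =====
-- def indices(hnames, dict):
--     """
--     Returns indices with indices corresponding to observables.
--     :param hnames: Names of observables. This is important as this determines the order of the observables! The dictionaries of the object, i.e. hdict and wdict, might be unordered. -> TODO: Use OrderedDict() instead?
--     :param dict: Either weights or history dict.
--     :return: Indices dictionary.
--     """
--     idxs = [[0, 0] for _ in hnames]
--     i = 0
--     for (k, v) in zip(range(len(hnames)), dict.values()):
--         n = len(v)
--         idxs[k][:] = [i, i + n]
--         i += n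
--     return idxs
-- ===== SOURCE B (Python) =====
-- def indices(hnames, dict):
--     lens = [len(v) for v in dict.values()]
--     m = min(len(hnames), len(lens))
--     return [[sum(lens[:k]), sum(lens[:k + 1])] if k < m else [0, 0]
--             for k in range(len(hnames))]
-- ===== Notes on version B (the rewrite author's own statement) =====
-- stated objective: alternative
-- what changed: Replaces the single loop threading a running offset through in-place slice assignment by a closed-form per-index formula: each entry k is [sum of the first k value lengths, sum of the first k+1], extra hnames padded with [0,0].
import Mathlib
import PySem

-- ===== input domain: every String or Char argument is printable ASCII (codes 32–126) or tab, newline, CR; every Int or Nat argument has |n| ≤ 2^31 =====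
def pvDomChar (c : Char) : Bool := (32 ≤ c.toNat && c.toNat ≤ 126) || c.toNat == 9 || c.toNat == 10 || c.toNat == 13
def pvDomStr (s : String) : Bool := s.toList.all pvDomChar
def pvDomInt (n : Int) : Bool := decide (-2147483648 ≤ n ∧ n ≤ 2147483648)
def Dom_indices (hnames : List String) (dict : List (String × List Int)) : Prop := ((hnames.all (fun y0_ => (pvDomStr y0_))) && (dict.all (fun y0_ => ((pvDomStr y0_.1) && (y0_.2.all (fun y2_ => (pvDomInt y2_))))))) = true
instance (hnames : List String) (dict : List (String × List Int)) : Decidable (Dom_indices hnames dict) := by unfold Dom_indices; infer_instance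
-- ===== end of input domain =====

-- B replaces A's running-offset loop (in-place slice assignment into a preallocated table) by a
-- closed-form per-index prefix-sum formula (objective: alternative; not claimed faster).

-- ===== PORT A =====
-- A: idxs = [[0,0] for _ in hnames]; i = 0
--    for (k, v) in zip(range(len(hnames)), dict.values()): n = len(v); idxs[k][:] = [i, i+n]; i += n
--    return idxs
def indices (hnames : List String) (dict : List (String × List Int)) : List (List Int) :=
  let idxs : List (List Int) := hnames.map (fun _ => [0, 0])
  let st := ((List.range hnames.length).zip (dict.map Prod.snd)).foldl
    (fun (st : List (List Int) × Int) kv =>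
      let n : Int := kv.2.length
      (st.1.set kv.1 [st.2, st.2 + n], st.2 + n))
    (idxs, 0)
  st.1

-- ===== PORT B =====
-- B: lens = [len(v) for v in dict.values()]; m = min(len(hnames), len(lens))
--    return [[sum(lens[:k]), sum(lens[:k+1])] if k < m else [0, 0] for k in range(len(hnames))]
def indices_alt (hnames : List String) (dict : List (String × List Int)) : List (List Int) :=
  let lens : List Int := dict.map (fun p => (p.2.length : Int))
  let m := min hnames.length lens.length
  (List.range hnames.length).map (fun k =>
    if k < m then [(lens.take k).sum, (lens.take (k + 1)).sum] else [0, 0])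

-- ===== PRECONDITION & SPEC =====
def Spec_indices (hnames : List String) (dict : List (String × List Int)) (out : List (List Int)) : Prop := out = indices_alt hnames dict
instance (hnames : List String) (dict : List (String × List Int)) (out : List (List Int)) : Decidable (Spec_indices hnames dict out) := by unfold Spec_indices; infer_instance

-- ===== CLAIM (what is proved, stated in full; the proofs are below) =====
def Claim_equal_indices : Prop := ∀ (hnames : List String) (dict : List (String × List Int)), Dom_indices hnames dict → Spec_indices hnames dict (indices hnames dict)

-- ===== LEMMAS AND PROOFS =====

-- A's loop, run over (range' s |vs|).zip vs, overwrites exactly the slots s .. s+|vs|-1 of the table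
-- with the running-offset intervals, i.e. with the prefix sums of the value lengths shifted by i.
theorem fold_set_decomp (vs : List (List Int)) :
    ∀ (s : Nat) (idxs : List (List Int)) (i : Int), s + vs.length ≤ idxs.length →
    (((List.range' s vs.length).zip vs).foldl
      (fun (st : List (List Int) × Int) kv =>
        let n : Int := kv.2.length
        (st.1.set kv.1 [st.2, st.2 + n], st.2 + n))
      (idxs, i)).1
    = idxs.take s ++
      (List.range vs.length).map (fun k =>
        [i + ((vs.take k).map (fun v => (v.length : Int))).sum,
         i + ((vs.take (k + 1)).map (fun v => (v.length : Int))).sum]) ++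
      idxs.drop (s + vs.length) := by
  induction vs with
  | nil => intro s idxs i h; simp
  | cons v vs ih =>
    intro s idxs i h
    simp only [List.length_cons] at h
    have hs : s < idxs.length := by omega
    simp only [List.length_cons, List.range'_succ, List.zip_cons_cons, List.foldl_cons]
    rw [ih (s+1) (idxs.set s [i, i + v.length]) (i + v.length) (by simp; omega)]
    rw [List.range_succ_eq_map]
    simp only [List.map_cons, List.map_map]
    rw [List.take_add_one, List.take_set_of_le (le_refl s),
        List.getElem?_set_self hs, List.drop_set_of_lt (by omega)]
    have hdrop : s + 1 + vs.length = s + (vs.length + 1) := by omega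
    rw [hdrop]
    simp only [List.append_assoc, List.cons_append, List.nil_append, Option.toList_some]
    congr 2
    · simp
    congr 1
    refine List.map_congr_left fun k _ => ?_
    simp [Function.comp, List.take_succ_cons, add_assoc]

-- zip against range' truncates both sides to the shorter length.
theorem zip_range'_truncate {α : Type} : ∀ (n : Nat) (l : List α) (s : Nat),
    (List.range' s n).zip l = (List.range' s (min n l.length)).zip (l.take (min n l.length)) := by
  intro n
  induction n with
  | zero => intro l s; simp
  | succ n ih =>
    intro l s
    cases l with
    | nil => simp
    | cons a l =>
      have hmin : min (n + 1) (a :: l).length = min n l.length + 1 := by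
        simp [Nat.succ_min_succ]
      rw [hmin]
      simp only [List.range'_succ, List.take_succ_cons, List.zip_cons_cons]
      rw [ih l (s+1)]

theorem indices_eq_alt (hnames : List String) (dict : List (String × List Int)) :
    indices hnames dict = indices_alt hnames dict := by
  unfold indices indices_alt
  simp only []
  rw [List.range_eq_range', zip_range'_truncate]
  have hlens : (dict.map (fun p => ((p.2.length : Int)))) = (dict.map Prod.snd).map (fun v => (v.length : Int)) := by
    simp [List.map_map, Function.comp]
  rw [hlens]
  set n := hnames.length with hn
  set vs := dict.map Prod.snd with hvs
  set m := min n vs.length with hm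
  have hmn : m ≤ n := by omega
  have hmv : m ≤ vs.length := by omega
  have hml : (vs.take m).length = m := by simp; omega
  have hll : (vs.map (fun v => (v.length : Int))).length = vs.length := by simp
  rw [show min n (vs.map (fun v => (v.length : Int))).length = m by rw [hll]]
  rw [show List.range' 0 m = List.range' 0 (vs.take m).length by rw [hml]]
  rw [fold_set_decomp (vs.take m) 0 (hnames.map (fun _ => ([0,0] : List Int))) 0
        (by simp [hml]; omega)]
  apply List.ext_getElem
  · simp [hml]; omega
  · intro k h1 h2
    simp only [List.take_zero, List.nil_append, Nat.zero_add] at *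
    have hk : k < n := by simpa using h2
    by_cases hkm : k < m
    · rw [List.getElem_append_left (by simp [hml]; omega)]
      rw [List.getElem_map, List.getElem_range]
      rw [List.getElem_map, List.getElem_range']
      simp only [Nat.zero_add, Nat.one_mul]
      rw [if_pos hkm]
      have t1 : ∀ j, j ≤ m → (List.take j (vs.take m)).map (fun v => (v.length : Int))
          = List.take j (vs.map (fun v => (v.length : Int))) := by
        intro j hj
        rw [List.take_take, Nat.min_eq_left hj, List.map_take]
      rw [t1 k (by omega), t1 (k+1) (by omega)]
      norm_num
    · rw [List.getElem_append_right (by simp [hml]; omega)]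
      rw [List.getElem_map, List.getElem_range']
      simp only [Nat.zero_add, Nat.one_mul]
      rw [if_neg hkm]
      simp

-- ===== VERDICT (by name: the statement is the Claim_ definition above) =====
theorem indices_spec : Claim_equal_indices := by
  intro hnames dict _
  exact indices_eq_alt hnames dict
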